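-- pv_equiv track=rewrite | github.com/AugustDanell/Kattis-Assignments | Python/natrij.py | minuteClock
-- ===== SOURCE A (Python) =====
-- def minuteClock(m1,m2):
--     carryOver = 0
--     minutes = 0
--
--     while(not m1 == m2):
--         m1 = m1 + 1
--         if(m1 == 60):
--             carryOver = 1
--             m1 = 0
--         minutes = minutes + 1
--
--     return carryOver, minutes
-- ===== SOURCE B (Python) =====
-- def minuteClock(m1, m2):
--     # Closed-form: three cases instead of single-stepping the clock.
--     if m1 == m2:
--         return 0, 0
--     if m1 < m2:
--         return 0, m2 - m1
--     return 1, 60 - m1 + m2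
-- ===== Notes on version B (the rewrite author's own statement) =====
-- stated objective: simpler
-- what changed: Replaced the minute-by-minute stepping loop (with wraparound at 60) by a three-case closed-form arithmetic expression; Pre_ restricts to the natural 0-59 clock-minute domain, outside which A's loop diverges on many inputs.
-- outside the precondition, e.g. on minuteClock(-5, 3): A returns (0, 8), B returns (0, 8); on minuteClock(60, 5): A does not finish within the time limit, B returns (1, 5)
import Mathlib
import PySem

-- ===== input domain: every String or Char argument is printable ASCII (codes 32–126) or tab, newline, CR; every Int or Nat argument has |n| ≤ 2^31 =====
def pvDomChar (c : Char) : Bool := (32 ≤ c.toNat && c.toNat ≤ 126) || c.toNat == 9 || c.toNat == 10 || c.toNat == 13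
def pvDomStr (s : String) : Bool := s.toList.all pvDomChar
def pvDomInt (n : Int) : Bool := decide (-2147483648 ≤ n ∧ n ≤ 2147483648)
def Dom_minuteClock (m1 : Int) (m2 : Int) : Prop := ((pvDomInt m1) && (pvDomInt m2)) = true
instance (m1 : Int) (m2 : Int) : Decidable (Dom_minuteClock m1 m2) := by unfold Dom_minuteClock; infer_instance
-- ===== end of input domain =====

-- B replaces A's minute-by-minute clock-stepping loop with a three-case closed-form
-- arithmetic expression (simpler); equivalence is claimed on the 0-59 clock domain.


-- ===== PORT A =====
-- A's while-loop, transcribed with a fuel bound; on the clock domain of Pre_ the loop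
-- runs at most 119 iterations, so fuel 120 never runs out there.
def minuteClockLoop (fuel : Nat) (m1 m2 carryOver minutes : Int) : Int × Int :=
  match fuel with
  | 0 => (carryOver, minutes)
  | f + 1 =>
    if m1 = m2 then (carryOver, minutes)
    else
      let m1' := m1 + 1
      if m1' = 60 then minuteClockLoop f 0 m2 1 (minutes + 1)
      else minuteClockLoop f m1' m2 carryOver (minutes + 1)

def minuteClock (m1 : Int) (m2 : Int) : Int × Int :=
  minuteClockLoop 120 m1 m2 0 0

-- ===== PORT B =====
def minuteClock_alt (m1 : Int) (m2 : Int) : Int × Int :=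
  if m1 = m2 then (0, 0)
  else if m1 < m2 then (0, m2 - m1)
  else (1, 60 - m1 + m2)

-- ===== PRECONDITION & SPEC =====
-- Pre_ restricts to the natural 0-59 clock-minute domain; outside it A's loop fails to
-- terminate on many inputs (e.g. (60, 5)) and non-clock values are not meaningful minutes.
def Pre_minuteClock (m1 : Int) (m2 : Int) : Prop :=
  0 ≤ m1 ∧ m1 < 60 ∧ 0 ≤ m2 ∧ m2 < 60
instance (m1 : Int) (m2 : Int) : Decidable (Pre_minuteClock m1 m2) := by unfold Pre_minuteClock; infer_instance

def pvWitness_minuteClock : Int × Int := (58, 3)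

def Spec_minuteClock (m1 : Int) (m2 : Int) (out : Int × Int) : Prop := out = minuteClock_alt m1 m2
instance (m1 : Int) (m2 : Int) (out : Int × Int) : Decidable (Spec_minuteClock m1 m2 out) := by unfold Spec_minuteClock; infer_instance

-- ===== CLAIM (what is proved, stated in full; the proofs are below) =====
def Claim_equal_minuteClock : Prop := ∀ (m1 : Int) (m2 : Int), Dom_minuteClock m1 m2 → Pre_minuteClock m1 m2 → Spec_minuteClock m1 m2 (minuteClock m1 m2)

-- ===== LEMMAS AND PROOFS =====

-- Counting up with no wrap: from m2 - k to m2 in k steps (all intermediate values ≤ m2 < 60).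
theorem loop_count_up (k : Nat) : ∀ (fuel : Nat), k ≤ fuel → ∀ (m2 carryOver minutes : Int), m2 < 60 →
    minuteClockLoop fuel (m2 - k) m2 carryOver minutes = (carryOver, minutes + k) := by
  induction k with
  | zero =>
    intro fuel _ m2 c m _
    cases fuel <;> simp [minuteClockLoop]
  | succ k ih =>
    intro fuel hf m2 c m hm2
    match fuel, hf with
    | f + 1, hf =>
      have hne : m2 - ((k : Int) + 1) ≠ m2 := by omega
      have hstep : m2 - ((k : Int) + 1) + 1 = m2 - k := by ring
      simp only [minuteClockLoop, Nat.cast_succ, if_neg hne, hstep]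
      rw [if_neg (show ¬ (m2 - (k : Int) = 60) by omega)]
      rw [ih f (by omega) m2 c (m + 1) hm2]
      simp only [Prod.mk.injEq]
      exact ⟨trivial, by ring⟩

-- From m1 = 60 - j (1 ≤ j) down past the wrap: j steps reach 0 with carry set.
theorem loop_wrap (j : Nat) : ∀ (fuel : Nat), j ≤ fuel → ∀ (m2 carryOver minutes : Int),
    m2 < 60 - (j : Int) → 1 ≤ j →
    minuteClockLoop fuel (60 - (j : Int)) m2 carryOver minutes
      = minuteClockLoop (fuel - j) 0 m2 1 (minutes + j) := by
  induction j with
  | zero => intro _ _ _ _ _ _ h1; omega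
  | succ j ih =>
    intro fuel hf m2 c m hm2 _
    match fuel, hf with
    | f + 1, hf =>
      simp only [minuteClockLoop, Nat.cast_succ]
      rw [if_neg (show ¬ (60 : Int) - ((j : Int) + 1) = m2 by omega)]
      by_cases hj : j = 0
      · subst hj
        norm_num
      · have hj1 : 1 ≤ j := Nat.one_le_iff_ne_zero.mpr hj
        rw [if_neg (show ¬ (60 : Int) - ((j : Int) + 1) + 1 = 60 by omega)]
        rw [show (60 : Int) - ((j : Int) + 1) + 1 = 60 - j from by ring]
        rw [ih f (by omega) m2 c (m + 1) (by omega) hj1]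
        rw [show f + 1 - (j + 1) = f - j from by omega]
        congr 1
        ring

-- ===== VERDICT (by name: the statement is the Claim_ definition above) =====
theorem minuteClock_spec : Claim_equal_minuteClock := by
  intro m1 m2 _ ⟨h1, h2, h3, h4⟩
  unfold Spec_minuteClock minuteClock minuteClock_alt
  by_cases heq : m1 = m2
  · subst heq
    simp [minuteClockLoop]
  · rw [if_neg heq]
    by_cases hlt : m1 < m2
    · rw [if_pos hlt]
      have h := loop_count_up (m2 - m1).toNat 120 (by omega) m2 0 0 h4
      rw [show m2 - (((m2 - m1).toNat : Int)) = m1 from by omega] at h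
      rw [h]
      simp only [Prod.mk.injEq]
      exact ⟨trivial, by omega⟩
    · rw [if_neg hlt]
      have hw := loop_wrap (60 - m1).toNat 120 (by omega) m2 0 0 (by omega) (by omega)
      rw [show (60 : Int) - (((60 - m1).toNat : Int)) = m1 from by omega] at hw
      rw [hw]
      have h := loop_count_up m2.toNat (120 - (60 - m1).toNat) (by omega) m2 1
        (0 + (((60 - m1).toNat : Int))) h4
      rw [show m2 - ((m2.toNat : Int)) = 0 from by omega] at h
      rw [h]
      simp only [Prod.mk.injEq]
      exact ⟨trivial, by omega⟩
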